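-- pv_equiv track=rewrite | github.com/goracle/dirichlet-divisor-conjecture | gauss_circle_conjecture/identities_verification/identity.py | r2
-- ===== SOURCE A (Python) =====
-- import math
--
-- def chi_m4(d):
--     if d % 2 == 0:
--         return 0
--     r = d % 4
--     if r == 1:
--         return 1
--     if r == 3:
--         return -1
--     return 0
--
-- def r2(n):
--     s = 0
--     for d in range(1, int(math.isqrt(n)) + 1):
--         if n % d == 0:
--             s += chi_m4(d)
--             if d*d != n:
--                 s += chi_m4(n//d)
--     return 4*s
-- ===== SOURCE B (Python) =====
-- def r2(n):
--     if n == 0: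
--         return 0
--     m = n
--     while m % 2 == 0:
--         m //= 2
--     total = 1
--     f = 3
--     while f * f <= m:
--         e = 0
--         while m % f == 0:
--             m //= f
--             e += 1
--         if e:
--             if f % 4 == 1:
--                 total *= e + 1
--             elif e % 2:
--                 total = 0
--         f += 2
--     if m > 1:
--         if m % 4 == 1:
--             total *= 2
--         elif m % 4 == 3:
--             total = 0
--     return 4 * total
-- ===== Notes on version B (the rewrite author's own statement) =====
-- stated objective: alternative
-- what changed: Replaces the sqrt(n)-bounded divisor-pair enumeration of the chi_4 divisor sum by trial-division factorization, combining prime powers multiplicatively: product of (e+1) over primes p = 1 mod 4, zero if any prime p = 3 mod 4 has odd exponent (factors of 2 stripped first).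
import Mathlib
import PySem

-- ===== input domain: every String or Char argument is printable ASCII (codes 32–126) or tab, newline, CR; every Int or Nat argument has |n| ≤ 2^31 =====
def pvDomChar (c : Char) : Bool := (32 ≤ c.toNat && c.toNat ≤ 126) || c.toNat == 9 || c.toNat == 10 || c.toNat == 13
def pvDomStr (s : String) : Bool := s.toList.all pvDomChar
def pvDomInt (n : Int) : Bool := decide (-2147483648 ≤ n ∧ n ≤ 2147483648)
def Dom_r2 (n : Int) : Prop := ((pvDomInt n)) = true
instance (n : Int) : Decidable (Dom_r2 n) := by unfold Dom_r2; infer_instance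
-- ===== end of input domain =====

-- B replaces A's √n-bounded divisor-pair enumeration of the χ₄ divisor sum by trial-division
-- factorization combined multiplicatively; on negative n A raises ValueError (math.isqrt), excluded by Pre_.


-- ===== PORT A =====
def chi_m4 (d : Int) : Int :=
  if PySem.Int.mod d 2 = 0 then 0
  else
    let r := PySem.Int.mod d 4
    if r = 1 then 1
    else if r = 3 then -1
    else 0

-- math.isqrt(n) ported as Nat.sqrt n.toNat: exact for 0 ≤ n (Pre_); Python raises ValueError for n < 0.
def r2 (n : Int) : Int :=
  let s := (PySem.List.pyRange 1 ((Nat.sqrt n.toNat : Int) + 1) 1).foldl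
    (fun s d =>
      if PySem.Int.mod n d = 0 then
        let s := s + chi_m4 d
        if d * d ≠ n then s + chi_m4 (PySem.Int.floordiv n d) else s
      else s) 0
  4 * s

-- ===== PORT B =====
-- B's loops run on Nat magnitudes (exact for 0 ≤ n, which Pre_ states; the n = 0 guard comes first
-- as in Source B).  `while m % 2 == 0: m //= 2` — the m ≠ 0 conjunct is a pure termination guard
-- (unreachable: the n == 0 case returned already and stripping keeps m ≠ 0).
def stripTwos (m : Nat) : Nat :=
  if h : m ≠ 0 ∧ m % 2 = 0 then stripTwos (m / 2) else m
decreasing_by exact Nat.div_lt_self (by omega) one_lt_two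

-- `e = 0; while m % f == 0: m //= f; e += 1` — returns (final m, e); the 2 ≤ f ∧ m ≠ 0 conjuncts
-- are pure termination guards (the caller always has f ≥ 3 and m ≥ 1).
def stripE (m f : Nat) : Nat × Nat :=
  if h : 2 ≤ f ∧ m ≠ 0 ∧ m % f = 0 then
    let p := stripE (m / f) f
    (p.1, p.2 + 1)
  else (m, 0)
decreasing_by exact Nat.div_lt_self (by omega) (by omega)

theorem stripE_fst_le (m f : Nat) : (stripE m f).1 ≤ m := by
  induction m using stripE.induct f with
  | case1 m h ih =>
      rw [stripE, dif_pos h]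
      calc (stripE (m / f) f).1 ≤ m / f := ih
        _ ≤ m := Nat.div_le_self m f
  | case2 m h => rw [stripE, dif_neg h]

-- `while f * f <= m:` — strip f, update total per the branch, f += 2
def loopF (m f : Nat) (total : Int) : Nat × Int :=
  if h : f * f ≤ m then
    let p := stripE m f
    let total := if p.2 ≠ 0 then
        (if f % 4 = 1 then total * ((p.2 : Int) + 1)
         else if p.2 % 2 = 1 then 0 else total)
      else total
    loopF p.1 (f + 2) total
  else (m, total)
termination_by (m + 1) - f
decreasing_by
  have h1 := stripE_fst_le m f
  have h2 : f ≤ f * f := by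
    rcases Nat.eq_zero_or_pos f with hf | hf
    · subst hf; simp
    · exact Nat.le_mul_of_pos_left f hf
  omega

-- the tail `if m > 1: ...` of Source B
def finalize (r : Nat × Int) : Int :=
  if 1 < r.1 then
    (if r.1 % 4 = 1 then r.2 * 2
     else if r.1 % 4 = 3 then 0 else r.2)
  else r.2

def r2_alt (n : Int) : Int :=
  if n = 0 then 0
  else
    let m := stripTwos n.toNat
    4 * finalize (loopF m 3 1)

-- ===== PRECONDITION & SPEC =====
-- A raises ValueError (math.isqrt) for negative n; Pre_ admits exactly the n on which A returns.
def Pre_r2 (n : Int) : Prop := 0 ≤ n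
instance (n : Int) : Decidable (Pre_r2 n) := by unfold Pre_r2; infer_instance
def pvWitness_r2 : Int := (12)

def Spec_r2 (n : Int) (out : Int) : Prop := out = r2_alt n
instance (n : Int) (out : Int) : Decidable (Spec_r2 n out) := by unfold Spec_r2; infer_instance

-- ===== CLAIM (what is proved, stated in full; the proofs are below) =====
def Claim_equal_r2 : Prop := ∀ (n : Int), Dom_r2 n → Pre_r2 n → Spec_r2 n (r2 n)

-- ===== LEMMAS AND PROOFS =====

-- χ₄ on Nat, and the χ₄ divisor sum S both programs compute 4× of
def chiN (j : Nat) : Int := if j % 4 = 1 then 1 else if j % 4 = 3 then -1 else 0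
def S (m : Nat) : Int := ∑ d ∈ m.divisors, chiN d

-- χ₄ at a cast Nat argument
theorem chi_cast (j : Nat) : chi_m4 (j : Int) = chiN j := by
  unfold chi_m4 chiN
  rw [show ((2:Int)) = ((2:Nat):Int) by norm_num, show ((4:Int)) = ((4:Nat):Int) by norm_num,
      PySem.Int.mod_natCast, PySem.Int.mod_natCast]
  have h : j % 4 = 0 ∨ j % 4 = 1 ∨ j % 4 = 2 ∨ j % 4 = 3 := by omega
  have h2 : j % 2 = j % 4 % 2 := by omega
  rcases h with h | h | h | h <;> simp [h2, h]

-- the body A folds with, written as an accumulator-plus-term function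
def FA (m d : Nat) : Int := if m % d = 0 then chiN d + (if d * d ≠ m then chiN (m / d) else 0) else 0

theorem stepA (n : Int) :
    (fun (s d : Int) =>
      if PySem.Int.mod n d = 0 then
        let s := s + chi_m4 d
        if d * d ≠ n then s + chi_m4 (PySem.Int.floordiv n d) else s
      else s)
    = fun s d => s + (if PySem.Int.mod n d = 0 then
        chi_m4 d + (if d * d ≠ n then chi_m4 (PySem.Int.floordiv n d) else 0) else 0) := by
  funext s d
  dsimp only
  split_ifs <;> ring

theorem castFA (m k : Nat) :
    (if PySem.Int.mod (m : Int) ((1:Int) + (k : Int)) = 0 then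
        chi_m4 ((1:Int) + (k : Int)) +
          (if ((1:Int) + (k : Int)) * ((1:Int) + (k : Int)) ≠ (m : Int) then
            chi_m4 (PySem.Int.floordiv (m : Int) ((1:Int) + (k : Int))) else 0)
      else 0) = FA m (1 + k) := by
  have h1 : ((1:Int) + (k : Int)) = ((1 + k : Nat) : Int) := by push_cast; ring
  rw [h1, PySem.Int.mod_natCast, PySem.Int.floordiv_natCast, chi_cast, chi_cast]
  unfold FA
  split_ifs <;> first | rfl | (exfalso; omega)

theorem listSum_range (n : Nat) (f : Nat → Int) :
    ((List.range n).map f).sum = ∑ k ∈ Finset.range n, f k := by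
  induction n with
  | zero => simp
  | succ t ih => rw [List.range_succ, List.map_append, List.sum_append, Finset.sum_range_succ, ih]; simp

theorem r2_eq (m : Nat) : r2 (m : Int) = 4 * ∑ d ∈ Finset.Ico 1 (Nat.sqrt m + 1), FA m d := by
  unfold r2
  rw [Int.toNat_natCast]
  rw [stepA, PySem.List.foldl_add, PySem.List.pyRange_one, List.map_map]
  have hl : ((((Nat.sqrt m : Int) + 1) - 1)).toNat = Nat.sqrt m := by omega
  rw [hl]
  rw [zero_add]
  have : ∀ k, ((fun d => (if PySem.Int.mod (m : Int) d = 0 then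
        chi_m4 d + (if d * d ≠ (m : Int) then chi_m4 (PySem.Int.floordiv (m : Int) d) else 0) else 0))
      ∘ (fun k : Nat => (1:Int) + (k : Int))) k = FA m (1 + k) := fun k => castFA m k
  rw [List.map_congr_left (fun k _ => this k)]
  rw [Finset.sum_Ico_eq_sum_range]
  simp only [Nat.add_sub_cancel]
  rw [listSum_range]

-- A's paired √-bounded enumeration sums χ₄ over ALL divisors (the small/large pairing)
theorem A_eq_divsum (m : Nat) : r2 (m : Int) = 4 * S m := by
  rw [r2_eq]
  unfold S
  rcases Nat.eq_zero_or_pos m with hm | hm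
  · subst hm; decide
  congr 1
  have hS : (Finset.Ico 1 (Nat.sqrt m + 1)).filter (fun d => m % d = 0)
      = m.divisors.filter (fun d => d * d ≤ m) := by
    ext d
    simp only [Finset.mem_filter, Finset.mem_Ico, Nat.mem_divisors]
    constructor
    · rintro ⟨⟨h1, h2⟩, h3⟩
      have hd : d ∣ m := Nat.dvd_of_mod_eq_zero h3
      exact ⟨⟨hd, by omega⟩, Nat.le_sqrt.mp (by omega)⟩
    · rintro ⟨⟨hd, _⟩, hsq⟩
      have h1 : 1 ≤ d := Nat.pos_of_dvd_of_pos hd hm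
      exact ⟨⟨h1, by have := Nat.le_sqrt.mpr hsq; omega⟩, Nat.mod_eq_zero_of_dvd hd⟩
  have hL : ∑ d ∈ Finset.Ico 1 (Nat.sqrt m + 1), FA m d
      = ∑ d ∈ m.divisors.filter (fun d => d * d ≤ m),
          (chiN d + if d * d ≠ m then chiN (m / d) else 0) := by
    unfold FA
    rw [← Finset.sum_filter, hS]
  rw [hL, Finset.sum_add_distrib]
  have hS' : (m.divisors.filter (fun d => d * d ≤ m)).filter (fun d => d * d ≠ m)
      = m.divisors.filter (fun d => d * d < m) := by
    rw [Finset.filter_filter]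
    apply Finset.filter_congr
    intro d _
    constructor
    · rintro ⟨h1, h2⟩; omega
    · intro h; omega
  have h2 : ∑ d ∈ m.divisors.filter (fun d => d * d ≤ m), (if d * d ≠ m then chiN (m / d) else 0)
      = ∑ d ∈ m.divisors.filter (fun d => d * d < m), chiN (m / d) := by
    rw [← Finset.sum_filter, hS']
  rw [h2]
  have hbij : ∑ d ∈ m.divisors.filter (fun d => d * d < m), chiN (m / d)
      = ∑ d ∈ m.divisors.filter (fun d => m < d * d), chiN d := by
    apply Finset.sum_nbij' (fun d => m / d) (fun e => m / e)
    · intro d hd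
      simp only [Finset.mem_filter, Nat.mem_divisors] at hd ⊢
      obtain ⟨⟨hdvd, hm0⟩, hlt⟩ := hd
      have hdpos : 0 < d := Nat.pos_of_dvd_of_pos hdvd hm
      have hmul : d * (m / d) = m := Nat.mul_div_cancel' hdvd
      have hlt2 : d < m / d := by
        by_contra h
        push Not at h
        have : d * (m / d) ≤ d * d := Nat.mul_le_mul_left d h
        omega
      refine ⟨⟨Nat.div_dvd_of_dvd hdvd, hm0⟩, ?_⟩
      calc m = d * (m / d) := hmul.symm
        _ < (m / d) * (m / d) := by
            apply Nat.mul_lt_mul_of_lt_of_le hlt2 (le_refl _)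
            omega
    · intro e he
      simp only [Finset.mem_filter, Nat.mem_divisors] at he ⊢
      obtain ⟨⟨hdvd, hm0⟩, hgt⟩ := he
      have hepos : 0 < e := Nat.pos_of_dvd_of_pos hdvd hm
      have hmul : e * (m / e) = m := Nat.mul_div_cancel' hdvd
      have hlt2 : m / e < e := by
        by_contra h
        push Not at h
        have : e * e ≤ e * (m / e) := Nat.mul_le_mul_left e h
        omega
      refine ⟨⟨Nat.div_dvd_of_dvd hdvd, hm0⟩, ?_⟩
      calc (m / e) * (m / e) < e * (m / e) := by
            apply Nat.mul_lt_mul_of_lt_of_le hlt2 (le_refl _)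
            have : 0 < m / e := Nat.div_pos (Nat.le_of_dvd hm hdvd) hepos
            omega
        _ = m := hmul
    · intro d hd
      simp only [Finset.mem_filter, Nat.mem_divisors] at hd
      exact Nat.div_div_self hd.1.1 hd.1.2
    · intro e he
      simp only [Finset.mem_filter, Nat.mem_divisors] at he
      exact Nat.div_div_self he.1.1 he.1.2
    · intro d _; rfl
  rw [hbij]
  have hnot : m.divisors.filter (fun d => ¬ d * d ≤ m) = m.divisors.filter (fun d => m < d * d) := by
    apply Finset.filter_congr; intro d _; constructor <;> intro h <;> omega
  have := Finset.sum_filter_add_sum_filter_not m.divisors (fun d => d * d ≤ m) chiN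
  rw [hnot] at this
  exact this

-- χ₄ is completely multiplicative
theorem chiN_mul (a b : Nat) : chiN (a * b) = chiN a * chiN b := by
  unfold chiN
  have hab : (a * b) % 4 = (a % 4) * (b % 4) % 4 := Nat.mul_mod a b 4
  have ha : a % 4 = 0 ∨ a % 4 = 1 ∨ a % 4 = 2 ∨ a % 4 = 3 := by omega
  have hb : b % 4 = 0 ∨ b % 4 = 1 ∨ b % 4 = 2 ∨ b % 4 = 3 := by omega
  rcases ha with ha | ha | ha | ha <;> rcases hb with hb | hb | hb | hb <;>
    rw [ha, hb] at hab <;> norm_num at hab <;> simp [ha, hb, hab]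

-- χ₄ as an arithmetic function, so that S = ζ * χ₄ is multiplicative
def chiF : ArithmeticFunction Int := ⟨fun n => chiN n, by decide⟩

theorem chiF_isMultiplicative : chiF.IsMultiplicative := by
  constructor
  · decide
  · intro a b _
    exact chiN_mul a b

theorem S_eq_zeta_mul (m : Nat) : S m = ((ArithmeticFunction.zeta : ArithmeticFunction Nat) * chiF) m := by
  rw [ArithmeticFunction.coe_zeta_mul_apply]
  rfl

theorem S_mul (a b : Nat) (h : Nat.Coprime a b) : S (a * b) = S a * S b := by
  rw [S_eq_zeta_mul, S_eq_zeta_mul, S_eq_zeta_mul]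
  exact (ArithmeticFunction.isMultiplicative_zeta.natCast.mul chiF_isMultiplicative).map_mul_of_coprime h

theorem chiN_pow (p i : Nat) : chiN (p ^ i) = (chiN p) ^ i := by
  induction i with
  | zero => rw [pow_zero, pow_zero]; decide
  | succ j ih => rw [pow_succ, chiN_mul, ih, pow_succ]

theorem S_prime_pow (p e : Nat) (hp : p.Prime) :
    S (p ^ e) = ∑ i ∈ Finset.range (e + 1), (chiN p) ^ i := by
  unfold S
  rw [Nat.sum_divisors_prime_pow hp]
  exact Finset.sum_congr rfl (fun i _ => chiN_pow p i)

theorem S_one : S 1 = 1 := by decide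

theorem S_two_pow (a : Nat) : S (2 ^ a) = 1 := by
  rw [S_prime_pow 2 a Nat.prime_two]
  have h2 : chiN 2 = 0 := by decide
  rw [h2]
  induction a with
  | zero => decide
  | succ b ih => rw [Finset.sum_range_succ, ih, pow_succ]; ring

theorem S_pow_one_mod (p e : Nat) (hp : p.Prime) (h1 : p % 4 = 1) :
    S (p ^ e) = (e : Int) + 1 := by
  rw [S_prime_pow p e hp]
  have hc : chiN p = 1 := by unfold chiN; rw [h1]; norm_num
  rw [hc]
  simp

theorem S_pow_three_mod (p e : Nat) (hp : p.Prime) (h3 : p % 4 = 3) :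
    S (p ^ e) = if e % 2 = 0 then 1 else 0 := by
  rw [S_prime_pow p e hp]
  have hc : chiN p = -1 := by unfold chiN; rw [h3]; norm_num
  rw [hc]
  induction e with
  | zero => decide
  | succ b ih =>
      rw [Finset.sum_range_succ, ih]
      rcases Nat.even_or_odd b with hb | hb
      · have h1 : b % 2 = 0 := Nat.even_iff.mp hb
        have h2 : (b + 1) % 2 = 1 := by omega
        have h3' : Odd (b + 1) := Nat.odd_iff.mpr h2
        rw [h3'.neg_one_pow]
        simp [h1, h2]
      · have h1 : b % 2 = 1 := Nat.odd_iff.mp hb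
        have h2 : (b + 1) % 2 = 0 := by omega
        have h3' : Even (b + 1) := Nat.even_iff.mpr h2
        rw [h3'.neg_one_pow]
        simp [h1, h2]

-- specifications of B's loops
theorem stripTwos_spec (m : Nat) (hm : m ≠ 0) :
    ∃ a, m = 2 ^ a * stripTwos m ∧ stripTwos m % 2 = 1 ∧ stripTwos m ≠ 0 := by
  induction m using stripTwos.induct with
  | case1 m h ih =>
      rw [stripTwos, dif_pos h]
      obtain ⟨a, ha, hodd, hne⟩ := ih (by omega)
      refine ⟨a + 1, ?_, hodd, hne⟩
      have h2 : 2 * (m / 2) = m := Nat.mul_div_cancel' (Nat.dvd_of_mod_eq_zero h.2)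
      calc m = 2 * (m / 2) := h2.symm
        _ = 2 * (2 ^ a * stripTwos (m / 2)) := by rw [← ha]
        _ = 2 ^ (a + 1) * stripTwos (m / 2) := by rw [pow_succ]; ring
  | case2 m h =>
      rw [stripTwos, dif_neg h]
      exact ⟨0, by omega, by omega, hm⟩

theorem stripE_spec (m f : Nat) (hf : 2 ≤ f) (hm : m ≠ 0) :
    m = f ^ (stripE m f).2 * (stripE m f).1 ∧ ¬ f ∣ (stripE m f).1 ∧ (stripE m f).1 ≠ 0 := by
  induction m using stripE.induct f with
  | case1 m h ih =>
      rw [stripE, dif_pos h]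
      have hdvd : f ∣ m := Nat.dvd_of_mod_eq_zero h.2.2
      have hmf : m / f ≠ 0 := by
        have := Nat.div_pos (Nat.le_of_dvd (by omega) hdvd) (by omega)
        omega
      obtain ⟨heq, hnd, hne⟩ := ih hmf
      refine ⟨?_, hnd, hne⟩
      simp only
      rw [pow_succ]
      have : f * (m / f) = m := Nat.mul_div_cancel' hdvd
      calc m = f * (m / f) := this.symm
        _ = f * (f ^ (stripE (m / f) f).2 * (stripE (m / f) f).1) := by rw [← heq]
        _ = f ^ (stripE (m / f) f).2 * f * (stripE (m / f) f).1 := by ring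
  | case2 m h =>
      rw [stripE, dif_neg h]
      have hnd : ¬ f ∣ m := by
        intro hd
        exact h ⟨hf, hm, Nat.mod_eq_zero_of_dvd hd⟩
      exact ⟨by simp, hnd, hm⟩

theorem loopF_correct : ∀ (m f : Nat) (t : Int),
    m % 2 = 1 → m ≠ 0 → 3 ≤ f → f % 2 = 1 → (∀ p, p.Prime → p ∣ m → f ≤ p) →
    finalize (loopF m f t) = t * S m := by
  intro m f t
  induction m, f, t using loopF.induct with
  | case1 m f t hguard p total' ih =>
      intro hm hm0 hf3 hfo hmin
      have hpdef : p = stripE m f := rfl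
      rw [loopF, dif_pos hguard, ← hpdef]
      obtain ⟨heq, hnd, hne⟩ := stripE_spec m f (by omega) hm0
      rw [← hpdef] at heq hnd hne
      have hdvd : p.1 ∣ m := heq.symm ▸ dvd_mul_left p.1 (f ^ p.2)
      have hm'odd : p.1 % 2 = 1 := by
        by_contra h
        have h0 : p.1 % 2 = 0 := by omega
        have h2 : (2:Nat) ∣ m := (Nat.dvd_of_mod_eq_zero h0).trans hdvd
        omega
      have hmin' : ∀ q, q.Prime → q ∣ p.1 → f + 2 ≤ q := by
        intro q hq hqd
        have hqm : q ∣ m := hqd.trans hdvd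
        have h1 := hmin q hq hqm
        have hqf : q ≠ f := by rintro rfl; exact hnd hqd
        have hqf1 : q ≠ f + 1 := by
          rintro rfl
          have h2 : (2:Nat) ∣ f + 1 := Nat.dvd_of_mod_eq_zero (by omega)
          have h3 : (2:Nat) ∣ m := h2.trans hqm
          omega
        omega
      have hih := ih hm'odd hne (by omega) (by omega) hmin'
      show finalize (loopF p.1 (f + 2) total') = t * S m
      by_cases he : p.2 ≠ 0
      · -- f divides m, hence f is prime (all prime factors of m are ≥ f)
        have hfdvd : f ∣ m := heq.symm ▸ dvd_mul_of_dvd_left (dvd_pow_self f he) p.1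
        have hfprime : f.Prime := by
          by_contra hnp
          have hmf := Nat.minFac_prime (show f ≠ 1 by omega)
          have h1 := hmin _ hmf ((Nat.minFac_dvd f).trans hfdvd)
          have h2 : f.minFac ≤ f := Nat.minFac_le (by omega)
          exact hnp (le_antisymm h2 h1 ▸ hmf)
        have hco : Nat.Coprime (f ^ p.2) p.1 :=
          ((Nat.Prime.coprime_iff_not_dvd hfprime).mpr hnd).pow_left _
        have hSm : S m = S (f ^ p.2) * S p.1 := by
          conv_lhs => rw [heq]
          exact S_mul _ _ hco
        rw [hih]
        have htot : total' = if h : p.2 ≠ 0 then (if h : f % 4 = 1 then t * ((p.2 : Int) + 1) else if h : p.2 % 2 = 1 then 0 else t) else t := rfl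
        rw [htot, dif_pos he]
        have hf4 : f % 4 = 1 ∨ f % 4 = 3 := by omega
        rcases hf4 with h4 | h4
        · rw [dif_pos h4, hSm, S_pow_one_mod f _ hfprime h4]
          ring
        · have h4ne : ¬ f % 4 = 1 := by omega
          rw [dif_neg h4ne, hSm, S_pow_three_mod f _ hfprime h4]
          by_cases hodd : p.2 % 2 = 1
          · rw [dif_pos hodd, if_neg (by omega)]
            ring
          · rw [dif_neg hodd, if_pos (by omega)]
            ring
      · -- e = 0: nothing stripped
        push Not at he
        have hp1 : p.1 = m := by
          rw [he, pow_zero, one_mul] at heq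
          omega
        rw [hih]
        have htot : total' = if h : p.2 ≠ 0 then (if h : f % 4 = 1 then t * ((p.2 : Int) + 1) else if h : p.2 % 2 = 1 then 0 else t) else t := rfl
        rw [htot, dif_neg (by simpa using he), hp1]
  | case2 m f t hguard =>
      intro hm hm0 hf3 hfo hmin
      rw [loopF, dif_neg hguard]
      rcases Nat.lt_or_ge 1 m with h1 | h1
      · -- m > 1: m has no prime factor below f > √m, so m is prime
        have hp : m.Prime := by
          by_contra hnp
          have hmf := Nat.minFac_prime (show m ≠ 1 by omega)
          have hge := hmin _ hmf (Nat.minFac_dvd m)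
          have hsq := Nat.minFac_sq_le_self (by omega) hnp
          rw [pow_two] at hsq
          exact hguard (le_trans (Nat.mul_le_mul hge hge) hsq)
        have hSp : S m = 1 + chiN m := by
          unfold S
          rw [Nat.Prime.divisors hp, Finset.sum_pair (by omega : (1:Nat) ≠ m)]
          norm_num [chiN]
        have hm4 : m % 4 = 1 ∨ m % 4 = 3 := by omega
        unfold finalize
        rw [if_pos h1]
        rcases hm4 with h4 | h4
        · rw [if_pos h4, hSp]
          unfold chiN
          rw [if_pos h4]
          ring
        · rw [if_neg (by omega), if_pos h4, hSp]
          unfold chiN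
          rw [if_neg (by omega), if_pos h4]
          ring
      · -- m = 1
        have hm1 : m = 1 := by omega
        subst hm1
        unfold finalize
        rw [if_neg (by omega), S_one]
        ring

theorem B_eq_divsum (m : Nat) (hm : m ≠ 0) : r2_alt (m : Int) = 4 * S m := by
  unfold r2_alt
  rw [if_neg (by exact_mod_cast hm), Int.toNat_natCast]
  obtain ⟨a, ha, hodd, hne⟩ := stripTwos_spec m hm
  have hmin : ∀ p, p.Prime → p ∣ stripTwos m → 3 ≤ p := by
    intro p hp hdvd
    have h2 := hp.two_le
    rcases Nat.eq_or_lt_of_le h2 with h | h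
    · exfalso
      have : 2 ∣ stripTwos m := h ▸ hdvd
      omega
    · omega
  have hco : Nat.Coprime (2 ^ a) (stripTwos m) := by
    apply Nat.Coprime.pow_left
    rw [Nat.prime_two.coprime_iff_not_dvd]
    omega
  have hSm : S m = S (stripTwos m) := by
    conv_lhs => rw [ha]
    rw [S_mul _ _ hco, S_two_pow]
    ring
  show 4 * finalize (loopF (stripTwos m) 3 1) = 4 * S m
  rw [loopF_correct (stripTwos m) 3 1 hodd hne (le_refl 3) (by omega) hmin, hSm]
  ring

-- ===== VERDICT (by name: the statement is the Claim_ definition above) =====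
theorem r2_spec : Claim_equal_r2 := by
  intro n _ hpre
  unfold Spec_r2
  unfold Pre_r2 at hpre
  lift n to Nat using hpre with m
  rcases Nat.eq_zero_or_pos m with h0 | h0
  · subst h0; decide
  · rw [A_eq_divsum, B_eq_divsum m (by omega)]
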